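-- pv_equiv track=rewrite | github.com/lovelymonkey0612/python-algorithm | test1.py | convert_string_number
-- ===== SOURCE A (Python) =====
-- def convert_string_number(string):
--     mapping = {
--         'A': 1, 'B': 2, 'C': 3, 'D': 4, 'E': 5,
--         'F': 6, 'G': 7, 'H': 8, 'I': 9, 'J': 10,
--         'K': 11, 'L': 12, 'M': 13, 'N': 14, 'O': 15,
--         'P': 16, 'Q': 17, 'R': 18, 'S': 19, 'T': 20,
--         'U': 21, 'V': 22, 'W': 23, 'X': 24, 'Y': 25,
--         'Z': 26
--     }
--     number = 0
--     for char in string: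
--         number = number * 100 + mapping.get(char, 0)
--
--     return number
-- ===== SOURCE B (Python) =====
-- def convert_string_number(string):
--     n = len(string)
--     total = 0
--     for i, c in enumerate(string):
--         if 'A' <= c <= 'Z':
--             total += (ord(c) - 64) * 100 ** (n - 1 - i)
--     return total
-- ===== Notes on version B (the rewrite author's own statement) =====
-- stated objective: alternative
-- what changed: Drops the 26-entry dict and the Horner accumulation: B computes each letter's value arithmetically as ord(c)-64 for 'A'<=c<='Z' (0 otherwise, as mapping.get gave) and sums it times its place value 100**(n-1-i).
import Mathlib
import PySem

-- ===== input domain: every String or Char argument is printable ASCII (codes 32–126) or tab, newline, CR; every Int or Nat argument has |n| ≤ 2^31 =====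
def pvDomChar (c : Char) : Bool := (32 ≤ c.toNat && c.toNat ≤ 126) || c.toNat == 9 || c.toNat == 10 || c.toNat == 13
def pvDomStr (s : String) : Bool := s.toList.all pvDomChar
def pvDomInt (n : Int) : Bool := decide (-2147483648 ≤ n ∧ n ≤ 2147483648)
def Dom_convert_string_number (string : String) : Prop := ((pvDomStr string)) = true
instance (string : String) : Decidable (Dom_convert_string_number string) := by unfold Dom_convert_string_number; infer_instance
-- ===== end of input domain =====

-- B drops the dict and the Horner loop: each letter's value is computed arithmetically
-- (ord(c) - 64 for 'A' ≤ c ≤ 'Z', else 0) and added times its place value 100^(n-1-i); alternative.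

-- ===== PORT A =====
-- the letter-value dict literal A builds
def csnMapping : PySem.Dict Char Int := PySem.Dict.ofList
  [('A', 1), ('B', 2), ('C', 3), ('D', 4), ('E', 5),
   ('F', 6), ('G', 7), ('H', 8), ('I', 9), ('J', 10),
   ('K', 11), ('L', 12), ('M', 13), ('N', 14), ('O', 15),
   ('P', 16), ('Q', 17), ('R', 18), ('S', 19), ('T', 20),
   ('U', 21), ('V', 22), ('W', 23), ('X', 24), ('Y', 25),
   ('Z', 26)]

def convert_string_number (string : String) : Int :=
  string.toList.foldl (fun number char => number * 100 + csnMapping.getD char 0) 0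

-- ===== PORT B =====
-- positional place-value sum; n - 1 - i ≥ 0 inside enumerate, so .toNat is exact
def convert_string_number_alt (string : String) : Int :=
  let n : Int := string.toList.length
  (PySem.List.enumerate string.toList).foldl
    (fun total p =>
      if 'A' ≤ p.2 ∧ p.2 ≤ 'Z' then
        total + ((p.2.toNat : Int) - 64) * (100 : Int) ^ (n - 1 - p.1).toNat
      else total) 0

-- ===== PRECONDITION & SPEC =====
def Spec_convert_string_number (string : String) (out : Int) : Prop := out = convert_string_number_alt string
instance (string : String) (out : Int) : Decidable (Spec_convert_string_number string out) := by unfold Spec_convert_string_number; infer_instance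

-- ===== CLAIM =====
def Claim_equal_convert_string_number : Prop := ∀ (string : String), Dom_convert_string_number string → Spec_convert_string_number string (convert_string_number string)

-- ===== LEMMAS AND PROOFS =====

-- the dict lookup with default 0 equals the arithmetic letter value
theorem csn_val_eq (c : Char) :
    csnMapping.getD c 0 = (if 'A' ≤ c ∧ c ≤ 'Z' then ((c.toNat : Int) - 64) else 0) := by
  by_cases h : 'A' ≤ c ∧ c ≤ 'Z'
  · have h1 : 65 ≤ c.toNat := h.1
    have h2 : c.toNat ≤ 90 := h.2
    have hval : c = Char.ofNat c.toNat := by simp [Char.ofNat_toNat]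
    rw [if_pos h, hval]
    set m := c.toNat with hm
    interval_cases m <;> decide
  · rw [if_neg h]
    have hm : csnMapping = PySem.Dict.mk
      [('A', 1), ('B', 2), ('C', 3), ('D', 4), ('E', 5), ('F', 6), ('G', 7), ('H', 8), ('I', 9), ('J', 10),
       ('K', 11), ('L', 12), ('M', 13), ('N', 14), ('O', 15), ('P', 16), ('Q', 17), ('R', 18), ('S', 19),
       ('T', 20), ('U', 21), ('V', 22), ('W', 23), ('X', 24), ('Y', 25), ('Z', 26)] := by decide
    have h' : ¬ (65 ≤ c.toNat ∧ c.toNat ≤ 90) := fun ⟨a, b⟩ => h ⟨a, b⟩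
    have hne : ∀ (k : Char), 65 ≤ k.toNat → k.toNat ≤ 90 → (k == c) = false := by
      intro k hk1 hk2
      simp only [beq_eq_false_iff_ne, ne_eq]
      intro he; subst he; exact h' ⟨hk1, hk2⟩
    simp [hm, PySem.Dict.getD, hne, PySem.Dict.get?]

theorem csn_A_shift (l : List Char) (acc : Int) :
    l.foldl (fun number char => number * 100 + csnMapping.getD char 0) acc
    = acc * (100 : Int) ^ l.length + l.foldl (fun number char => number * 100 + csnMapping.getD char 0) 0 := by
  induction l generalizing acc with
  | nil => simp
  | cons c t ih =>
    simp only [List.foldl_cons, List.length_cons]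
    rw [ih (acc * 100 + csnMapping.getD c 0), ih (0 * 100 + csnMapping.getD c 0)]
    ring

theorem csn_B_main (l : List Char) (s : Nat) (acc : Int) (n : Int) (hn : n = s + l.length) :
    (PySem.List.enumerate l (s : Int)).foldl
      (fun total p =>
        if 'A' ≤ p.2 ∧ p.2 ≤ 'Z' then
          total + ((p.2.toNat : Int) - 64) * (100 : Int) ^ (n - 1 - p.1).toNat
        else total) acc
    = acc + l.foldl (fun number char => number * 100 + csnMapping.getD char 0) 0 := by
  induction l generalizing s acc with
  | nil => simp
  | cons c t ih =>
    rw [PySem.List.enumerate_cons, List.foldl_cons]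
    have hcast : (s : Int) + 1 = ((s + 1 : Nat) : Int) := by push_cast; ring
    have hexp : (n - 1 - (s : Int)).toNat = t.length := by
      simp only [hn, List.length_cons]; omega
    have hn' : n = (s + 1 : Nat) + t.length := by simp only [hn, List.length_cons]; push_cast; ring
    rw [hcast, ih (s + 1) _ hn']
    simp only [List.foldl_cons, hexp]
    rw [csn_A_shift t (0 * 100 + csnMapping.getD c 0), csn_val_eq c]
    by_cases h : 'A' ≤ c ∧ c ≤ 'Z'
    · rw [if_pos h, if_pos h]; ring
    · rw [if_neg h, if_neg h]; ring

-- ===== VERDICT =====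
theorem convert_string_number_spec : Claim_equal_convert_string_number := by
  intro s _
  unfold Spec_convert_string_number convert_string_number convert_string_number_alt
  have h := csn_B_main s.toList 0 0 s.toList.length (by simp)
  simp only [Nat.cast_zero, zero_add] at h
  simpa using h.symm
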